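-- pv_equiv track=rewrite | github.com/micolak0115/korea10k | paper/Figure3.py | get_count_per_window_from_index
-- ===== SOURCE A (Python) =====
-- import math
--
-- def get_count_per_window_from_index(list_index, window_size):
--     dict_window_ind_to_cnt = dict()
--     for val in list_index:
--         window_index = math.floor(val / window_size)
--
--         if dict_window_ind_to_cnt.get(window_index) == None:
--             dict_window_ind_to_cnt[window_index] = 0
--         dict_window_ind_to_cnt[window_index] += 1
--     return dict_window_ind_to_cnt
-- ===== SOURCE B (Python) =====
-- import math
--
-- def get_count_per_window_from_index(list_index, window_size):
--     # Repeated partition: peel off one whole bucket per round instead of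
--     # streaming increments into a dict.
--     bins = [math.floor(val / window_size) for val in list_index]
--     result = {}
--     while bins:
--         b = bins[0]
--         rest = [x for x in bins if x != b]
--         result[b] = len(bins) - len(rest)
--         bins = rest
--     return result
-- ===== Notes on version B (the rewrite author's own statement) =====
-- stated objective: alternative
-- what changed: Replaces A's one-pass dict-increment histogram with a dict-free repeated-partition scheme: map values to bins, then repeatedly take the first remaining bin, split the worklist into that bucket and the rest, and record the bucket size as the length difference; no per-element dict lookups or increments remain.
import Mathlib
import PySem

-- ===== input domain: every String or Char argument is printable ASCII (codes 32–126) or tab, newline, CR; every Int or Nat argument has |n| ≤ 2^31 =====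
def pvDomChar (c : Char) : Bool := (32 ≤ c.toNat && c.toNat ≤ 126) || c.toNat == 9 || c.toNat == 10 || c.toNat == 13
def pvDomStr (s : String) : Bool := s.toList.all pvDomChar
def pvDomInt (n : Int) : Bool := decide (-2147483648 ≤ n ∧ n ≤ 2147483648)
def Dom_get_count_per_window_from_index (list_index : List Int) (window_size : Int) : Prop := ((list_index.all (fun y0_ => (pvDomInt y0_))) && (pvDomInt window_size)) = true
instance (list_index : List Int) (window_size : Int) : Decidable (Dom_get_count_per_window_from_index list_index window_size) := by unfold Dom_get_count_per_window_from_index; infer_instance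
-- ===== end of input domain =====

-- B replaces A's streaming dict-increment histogram by a dict-free repeated-partition
-- scheme (peel off one whole bucket per round); objective: alternative algorithm,
-- identical result including dict insertion order.
-- math.floor(val / window_size) is ported as PySem.Int.floordiv: exact on Dom
-- (|val|, |window_size| ≤ 2^31, so the float quotient never rounds across an integer).

-- ===== PORT A =====
def get_count_per_window_from_index (list_index : List Int) (window_size : Int) : List (Int × Int) :=
  (list_index.foldl (fun d val =>
      let window_index := PySem.Int.floordiv val window_size
      let d := if d.get? window_index == none then d.insert window_index 0 else d
      d.insert window_index (d.getD window_index 0 + 1))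
    PySem.Dict.empty).items

-- ===== PORT B =====
-- The 'while bins:' worklist loop of Source B: take the first bin b, split the worklist
-- into the rest (x ≠ b), append (b, peeled amount), continue on the rest.
def pvPeelBuckets : List Int → List (Int × Int)
  | [] => []
  | b :: t =>
    let rest := (b :: t).filter (fun x => decide (x ≠ b))
    (b, ((b :: t).length : Int) - (rest.length : Int)) :: pvPeelBuckets rest
termination_by bs => bs.length
decreasing_by
  simp only [List.filter_cons, decide_not]
  simp [Nat.lt_succ_of_le (List.length_filter_le _ _)]

def get_count_per_window_from_index_alt (list_index : List Int) (window_size : Int) : List (Int × Int) :=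
  let bins := list_index.map (fun val => PySem.Int.floordiv val window_size)
  pvPeelBuckets bins

-- ===== PRECONDITION & SPEC =====
-- Pre_ excludes only inputs where Python raises ZeroDivisionError: window_size = 0
-- with a nonempty list (both A and B raise there; an empty list divides nothing, so it stays inside Pre_).
def Pre_get_count_per_window_from_index (list_index : List Int) (window_size : Int) : Prop :=
  window_size ≠ 0 ∨ list_index = []
instance (list_index : List Int) (window_size : Int) : Decidable (Pre_get_count_per_window_from_index list_index window_size) := by unfold Pre_get_count_per_window_from_index; infer_instance

def pvWitness_get_count_per_window_from_index : List Int × Int := ([3, -4, 3, 10], 5)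

def Spec_get_count_per_window_from_index (list_index : List Int) (window_size : Int) (out : List (Int × Int)) : Prop := out = get_count_per_window_from_index_alt list_index window_size
instance (list_index : List Int) (window_size : Int) (out : List (Int × Int)) : Decidable (Spec_get_count_per_window_from_index list_index window_size out) := by unfold Spec_get_count_per_window_from_index; infer_instance

-- ===== CLAIM (what is proved, stated in full; the proofs are below) =====
def Claim_equal_get_count_per_window_from_index : Prop := ∀ (list_index : List Int) (window_size : Int), Dom_get_count_per_window_from_index list_index window_size → Pre_get_count_per_window_from_index list_index window_size → Spec_get_count_per_window_from_index list_index window_size (get_count_per_window_from_index list_index window_size)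

-- ===== LEMMAS AND PROOFS =====

-- A's loop body (guarded insert-0 then increment) is the plain counter step.
theorem stepA_eq_counter_step (d : PySem.Dict Int Int) (w : Int) :
    (let d' := if d.get? w == none then d.insert w 0 else d
     d'.insert w (d'.getD w 0 + 1)) = d.insert w (d.getD w 0 + 1) := by
  by_cases h : d.get? w = none
  · simp [h, PySem.Dict.getD_insert_self, PySem.Dict.insert_insert_self,
      PySem.Dict.getD_of_get?_eq_none d 0 h]
  · simp [h]

-- ofList commutes with filter.
theorem ofList_filter (p : Int → Bool) (l : List Int) :
    PySem.Set.ofList (l.filter p) = (PySem.Set.ofList l).filter p := by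
  induction l with
  | nil => simp [PySem.Set.ofList]
  | cons a t ih =>
    by_cases hp : p a = true
    · rw [List.filter_cons_of_pos hp, PySem.Set.ofList_cons, PySem.Set.ofList_cons,
        List.filter_cons_of_pos hp]
      simp only [PySem.Set.discard, ih, List.filter_filter]
      congr 1
      exact List.filter_congr (fun y _ => by rw [Bool.and_comm])
    · have hp' : p a = false := by simpa using hp
      rw [List.filter_cons_of_neg (by simp [hp']), ih, PySem.Set.ofList_cons,
        List.filter_cons_of_neg (by simp [hp'])]
      simp only [PySem.Set.discard, List.filter_filter]
      refine (List.filter_congr (fun y _ => ?_)).symm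
      by_cases hy : y = a
      · subst hy; simp [hp']
      · simp [hy]

theorem count_filter_ne (k b : Int) (hk : k ≠ b) (l : List Int) :
    List.count k (l.filter (fun x => !(x == b))) = List.count k l := by
  simp only [List.count_eq_countP, List.countP_filter]
  refine List.countP_congr (fun y _ => ?_)
  by_cases hy : y = k
  · subst hy; simp [hk]
  · simp [hy]

theorem length_sub_filter (b : Int) (l : List Int) :
    ((l.filter (fun x => !(x == b))).length : Int) + (List.count b l : Int) = (l.length : Int) := by
  induction l with
  | nil => simp
  | cons a t ih =>
    by_cases hab : a = b
    · subst hab; simp only [List.count_cons]; simp; omega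
    · simp only [List.filter_cons, List.count_cons]
      simp [hab]
      omega

-- The partition loop computes exactly the first-occurrence dedup paired with counts.
theorem pvPeelBuckets_eq (bs : List Int) :
    pvPeelBuckets bs
      = (PySem.Set.ofList bs).map (fun k => (k, (List.count k bs : Int))) := by
  induction hn : bs.length using Nat.strong_induction_on generalizing bs with
  | _ n ih =>
    match bs with
    | [] => simp [pvPeelBuckets, PySem.Set.ofList]
    | b :: t =>
      rw [pvPeelBuckets]
      have hrest : (b :: t).filter (fun x => decide (x ≠ b)) = t.filter (fun x => !(x == b)) := by
        have hdec : (fun x : Int => decide (x ≠ b)) = (fun x : Int => !(x == b)) := by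
          funext x; by_cases hxb : x = b <;> simp [hxb]
        rw [hdec]; simp
      have hlen : (t.filter (fun x => !(x == b))).length < n := by
        subst hn
        exact Nat.lt_succ_of_le (List.length_filter_le _ _)
      have ihr := ih _ hlen (t.filter (fun x => !(x == b))) rfl
      rw [hrest, ihr, ofList_filter, PySem.Set.ofList_cons]
      simp only [PySem.Set.discard, List.map_cons]
      congr 1
      · -- head entry: the peeled amount is the count of b in b :: t
        have h := length_sub_filter b t
        have hcc : List.count b (b :: t) = List.count b t + 1 := by
          simp
        refine Prod.ext rfl ?_
        simp only [List.length_cons, hcc]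
        push_cast
        omega
      · refine List.map_congr_left (fun k hk => ?_)
        have h2 := (List.mem_filter.mp hk).2
        have hkb : k ≠ b := by simpa using h2
        rw [count_filter_ne k b hkb]
        simp [Ne.symm hkb]

theorem get_count_per_window_from_index_spec' (list_index : List Int) (window_size : Int) :
    get_count_per_window_from_index list_index window_size
      = get_count_per_window_from_index_alt list_index window_size := by
  show (list_index.foldl (fun d val =>
      let window_index := PySem.Int.floordiv val window_size
      let d := if d.get? window_index == none then d.insert window_index 0 else d
      d.insert window_index (d.getD window_index 0 + 1)) PySem.Dict.empty).items
    = pvPeelBuckets (list_index.map (fun val => PySem.Int.floordiv val window_size))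
  have hfold :
      list_index.foldl (fun d val =>
          let window_index := PySem.Int.floordiv val window_size
          let d := if d.get? window_index == none then d.insert window_index 0 else d
          d.insert window_index (d.getD window_index 0 + 1))
        (PySem.Dict.empty : PySem.Dict Int Int)
      = (list_index.map (fun val => PySem.Int.floordiv val window_size)).foldl
          (fun d w => d.insert w (d.getD w 0 + 1)) (PySem.Dict.empty : PySem.Dict Int Int) := by
    rw [List.foldl_map]
    exact PySem.List.foldl_congr_mem _ _ _ _ (fun d val _ => stepA_eq_counter_step d _)
  rw [hfold, PySem.Dict.foldl_insert_getD_add_one_eq_counter, PySem.Dict.items_counter,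
    pvPeelBuckets_eq]

-- ===== VERDICT (by name: the statement is the Claim_ definition above) =====
theorem get_count_per_window_from_index_spec : Claim_equal_get_count_per_window_from_index := by
  intro list_index window_size _ _
  exact get_count_per_window_from_index_spec' list_index window_size
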